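-- pv_equiv track=rewrite | github.com/ungureancatalina/UBB--FMI | AN_2/SEM_1/plf/lab1/lab1.py | gasire
-- ===== SOURCE A (Python) =====
-- def gasire(lista, n,index):
--     if index==n:
--         return lista[0]
--     else:
--         if index>n:
--             return -1
--         else:
--             return gasire(lista[1:],n,index+1)
-- ===== SOURCE B (Python) =====
-- def gasire(lista, n, index):
--     # Direct indexing instead of A's slice-and-recurse.
--     if index > n:
--         return -1
--     return lista[n - index]
-- ===== Notes on version B (the rewrite author's own statement) =====
-- stated objective: simpler
-- what changed: Replaces A's recursion that repeatedly slices the list (lista[1:]) with a single direct index lista[n-index], keeping the -1 branch for index > n.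
import Mathlib
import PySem

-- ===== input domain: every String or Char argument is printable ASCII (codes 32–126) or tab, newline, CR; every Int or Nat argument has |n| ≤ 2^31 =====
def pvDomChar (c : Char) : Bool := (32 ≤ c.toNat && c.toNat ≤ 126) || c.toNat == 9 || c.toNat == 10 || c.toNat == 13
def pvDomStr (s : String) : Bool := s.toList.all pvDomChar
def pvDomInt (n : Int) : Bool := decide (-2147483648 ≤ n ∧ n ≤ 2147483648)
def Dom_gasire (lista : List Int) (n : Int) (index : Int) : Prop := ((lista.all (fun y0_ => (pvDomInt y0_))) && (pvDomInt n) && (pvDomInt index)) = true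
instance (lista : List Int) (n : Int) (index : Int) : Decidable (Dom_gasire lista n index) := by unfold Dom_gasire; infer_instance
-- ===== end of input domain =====

-- B replaces A's slice-and-recurse with one direct index (simpler); equivalence on Pre_.
-- ===== PORT A =====
def gasire (lista : List Int) (n : Int) (index : Int) : Int :=
  if index = n then
    (PySem.List.pyGet? lista 0).getD 0  -- lista[0]; none = IndexError, excluded by Pre_
  else
    if index > n then -1
    else gasire (PySem.List.slice lista (some 1)) n (index + 1)  -- gasire(lista[1:], n, index+1)
termination_by (n - index).toNat
decreasing_by omega

-- ===== PORT B =====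
def gasire_alt (lista : List Int) (n : Int) (index : Int) : Int :=
  if index > n then -1
  else (PySem.List.pyGet? lista (n - index)).getD 0  -- lista[n-index]; none = IndexError, excluded by Pre_

-- ===== PRECONDITION & SPEC =====
-- Pre_ excludes exactly the inputs where Python A raises IndexError (index ≤ n but the
-- list is too short to reach position n - index); Python B raises IndexError there too.
def Pre_gasire (lista : List Int) (n : Int) (index : Int) : Prop :=
  index > n ∨ n - index < (lista.length : Int)
instance (lista : List Int) (n : Int) (index : Int) : Decidable (Pre_gasire lista n index) := by
  unfold Pre_gasire; infer_instance

def pvWitness_gasire : List Int × Int × Int := ([4, 7, 9], 2, 0)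

def Spec_gasire (lista : List Int) (n : Int) (index : Int) (out : Int) : Prop := out = gasire_alt lista n index
instance (lista : List Int) (n : Int) (index : Int) (out : Int) : Decidable (Spec_gasire lista n index out) := by unfold Spec_gasire; infer_instance

-- ===== CLAIM (what is proved, stated in full; the proofs are below) =====
def Claim_equal_gasire : Prop := ∀ (lista : List Int) (n : Int) (index : Int), Dom_gasire lista n index → Pre_gasire lista n index → Spec_gasire lista n index (gasire lista n index)

-- ===== LEMMAS AND PROOFS =====
theorem gasire_eq_alt (lista : List Int) (n : Int) (index : Int)
    (h : Pre_gasire lista n index) : gasire lista n index = gasire_alt lista n index := by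
  rw [gasire]
  by_cases he : index = n
  · subst he
    simp [gasire_alt]
  · by_cases hg : index > n
    · simp [he, hg, gasire_alt]
    · have hlt : index < n := by omega
      have hlen : n - index < (lista.length : Int) := by
        rcases h with h | h; · omega
        · exact h
      simp only [he, hg, if_false]
      rw [gasire_eq_alt (PySem.List.slice lista (some 1)) n (index + 1)]
      · unfold gasire_alt
        rw [PySem.List.slice_from lista (by norm_num : (0:Int) ≤ 1)]
        simp only [if_neg (by omega : ¬ index + 1 > n), if_neg hg]
        have h1 : n - (index + 1) = ((n - index - 1).toNat : Int) := by omega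
        have h2 : n - index = ((n - index).toNat : Int) := by omega
        rw [h1, h2, PySem.List.pyGet?_natCast, PySem.List.pyGet?_natCast]
        rw [List.getElem?_drop]
        have h3 : Int.toNat 1 + ((((n - index).toNat : Int)) - 1).toNat = (n - index).toNat := by omega
        rw [h3]
      · unfold Pre_gasire
        rw [PySem.List.slice_from lista (by norm_num : (0:Int) ≤ 1)]
        right
        rw [List.length_drop]
        omega
termination_by (n - index).toNat
decreasing_by omega

-- ===== VERDICT (by name: the statement is the Claim_ definition above) =====
theorem gasire_spec : Claim_equal_gasire := by
  intro lista n index _ hpre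
  exact gasire_eq_alt lista n index hpre
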